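-- pv_equiv track=rewrite | github.com/jacksonfew/NetSuiteDataMigration | SO Transform.py | transform
-- ===== SOURCE A (Python) =====
-- def transform(ext, mapdic):
--     head = ext[0]
--     newhead = list(mapdic.keys())
--     full = [newhead]
--
--     for row in ext[1:]:
--         nrow = [None]*len(newhead)
--
--         for field in newhead:
--             i = newhead.index(field)
--             ty = mapdic[field][0]
--             loc = mapdic[field][1]
--             sf = mapdic[field][2]
--
--             if ty == 'Static':
--                 nrow[i] = sf
--             elif ty == 'Match':
--                 sfi = head.index(sf)
--                 nrow[i] = row[sfi]
--             elif ty == 'Lookup':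
--                 if loc == 'qty':
--                     qty = row[head.index('Quantity')]
--                     qtyn = row[head.index('Quantity Needed')]
--
--                     if qtyn != None:
--                         nrow[i] = qtyn
--                     else:
--                         nrow[i] = qty
--
--         full.append(nrow)
--
--     return full
-- ===== SOURCE B (Python) =====
-- def transform(ext, mapdic):
--     head = ext[0]
--     newhead = list(mapdic.keys())
--     body = ext[1:]
--     out = [newhead]
--     if body:
--         plan = []
--         for field in newhead:
--             ty, loc, sf = mapdic[field][0], mapdic[field][1], mapdic[field][2]
--             if ty == 'Static':
--                 plan.append(('static', sf))
--             elif ty == 'Match':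
--                 plan.append(('copy', head.index(sf)))
--             elif ty == 'Lookup' and loc == 'qty':
--                 plan.append(('qty', head.index('Quantity'), head.index('Quantity Needed')))
--             else:
--                 plan.append(('skip',))
--         for row in body:
--             nrow = []
--             for r in plan:
--                 tag = r[0]
--                 if tag == 'static':
--                     nrow.append(r[1])
--                 elif tag == 'copy':
--                     nrow.append(row[r[1]])
--                 elif tag == 'qty':
--                     qtyn = row[r[2]]
--                     nrow.append(qtyn if qtyn != None else row[r[1]])
--                 else:
--                     nrow.append(None)
--             out.append(nrow)
--     return out
-- ===== Notes on version B (the rewrite author's own statement) =====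
-- stated objective: faster
-- what changed: B compiles the mapping into a per-column resolver plan once (hoisting the newhead.index self-scan, dict lookups, type dispatch and head.index scans out of the row loop) and then fills each output row by applying the precomputed resolvers, instead of re-resolving every column for every row.
import Mathlib
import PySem

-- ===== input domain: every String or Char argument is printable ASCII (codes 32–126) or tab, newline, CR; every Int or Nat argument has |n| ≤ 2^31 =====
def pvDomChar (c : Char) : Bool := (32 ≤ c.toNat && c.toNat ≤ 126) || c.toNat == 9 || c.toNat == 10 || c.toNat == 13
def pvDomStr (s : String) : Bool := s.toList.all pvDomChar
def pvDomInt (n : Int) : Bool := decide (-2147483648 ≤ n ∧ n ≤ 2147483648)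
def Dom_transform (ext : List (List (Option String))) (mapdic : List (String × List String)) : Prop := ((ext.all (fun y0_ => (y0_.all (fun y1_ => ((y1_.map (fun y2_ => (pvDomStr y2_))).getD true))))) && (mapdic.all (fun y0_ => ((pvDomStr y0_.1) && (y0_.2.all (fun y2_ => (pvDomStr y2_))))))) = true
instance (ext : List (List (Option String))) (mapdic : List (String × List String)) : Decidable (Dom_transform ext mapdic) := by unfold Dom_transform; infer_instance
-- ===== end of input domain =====

-- B precompiles the column mapping into per-column resolvers once, then fills each row by applying them
-- (objective: faster — the per-cell index scans and type dispatch of A are hoisted out of the row loop).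


-- ===== PORT A =====
-- literal port of A; the .getD fallbacks mark exactly the spots where the Python raises
-- (IndexError/ValueError) — those inputs are excluded by Pre_transform below
def transform (ext : List (List (Option String))) (mapdic : List (String × List String)) : List (List (Option String)) :=
  let d := PySem.Dict.ofList mapdic
  let head := (PySem.List.pyGet? ext 0).getD []
  let newhead := d.keys
  (PySem.List.slice ext (some 1) none).foldl (fun full row =>
      full ++ [ newhead.foldl (fun nrow field =>
          let i := (PySem.List.index? newhead field).getD 0
          let entry := (d.get? field).getD []
          let ty := (PySem.List.pyGet? entry 0).getD ""
          let loc := (PySem.List.pyGet? entry 1).getD ""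
          let sf := (PySem.List.pyGet? entry 2).getD ""
          if ty = "Static" then nrow.set i (some sf)
          else if ty = "Match" then
            let sfi := (PySem.List.index? head (some sf)).getD 0
            nrow.set i ((PySem.List.pyGet? row (sfi : Int)).getD none)
          else if ty = "Lookup" then
            if loc = "qty" then
              let qty := (PySem.List.pyGet? row (((PySem.List.index? head (some "Quantity")).getD 0 : Nat) : Int)).getD none
              let qtyn := (PySem.List.pyGet? row (((PySem.List.index? head (some "Quantity Needed")).getD 0 : Nat) : Int)).getD none
              if qtyn ≠ none then nrow.set i qtyn else nrow.set i qty
            else nrow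
          else nrow)
        (List.replicate newhead.length (none : Option String)) ])
    [newhead]

-- ===== PORT B =====
inductive PvResolver where
  | static (s : String)
  | copy (j : Nat)
  | qty (qi ni : Nat)
  | skip
deriving Repr, DecidableEq

def pvResolve (head : List (Option String)) (d : PySem.Dict String (List String)) (field : String) : PvResolver :=
  let entry := (d.get? field).getD []
  let ty := (PySem.List.pyGet? entry 0).getD ""
  let loc := (PySem.List.pyGet? entry 1).getD ""
  let sf := (PySem.List.pyGet? entry 2).getD ""
  if ty = "Static" then .static sf
  else if ty = "Match" then .copy ((PySem.List.index? head (some sf)).getD 0)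
  else if ty = "Lookup" ∧ loc = "qty" then
    .qty ((PySem.List.index? head (some "Quantity")).getD 0)
        ((PySem.List.index? head (some "Quantity Needed")).getD 0)
  else .skip

def pvApply (r : PvResolver) (row : List (Option String)) : Option String :=
  match r with
  | .static s => some s
  | .copy j => (PySem.List.pyGet? row (j : Int)).getD none
  | .qty qi ni =>
      let qtyn := (PySem.List.pyGet? row (ni : Int)).getD none
      if qtyn ≠ none then qtyn else (PySem.List.pyGet? row (qi : Int)).getD none
  | .skip => none

def transform_alt (ext : List (List (Option String))) (mapdic : List (String × List String)) : List (List (Option String)) :=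
  let d := PySem.Dict.ofList mapdic
  let head := (PySem.List.pyGet? ext 0).getD []
  let newhead := d.keys
  let body := PySem.List.slice ext (some 1) none
  if body.isEmpty then [newhead]
  else
    let plan := newhead.map (pvResolve head d)
    newhead :: body.map (fun row => plan.map (fun r => pvApply r row))

-- ===== PRECONDITION & SPEC =====
-- Pre_ excludes exactly the inputs where the Python raises: empty ext (IndexError on ext[0]) and,
-- when at least one data row exists, mapping entries of length < 3 (IndexError), a 'Match' source
-- field or 'Quantity'/'Quantity Needed' missing from the header (ValueError from .index), or a data
-- row too short for a looked-up column index (IndexError).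
def Pre_transform (ext : List (List (Option String))) (mapdic : List (String × List String)) : Prop :=
  ext ≠ [] ∧
  (2 ≤ ext.length →
    ∀ p ∈ (PySem.Dict.ofList mapdic).items,
      3 ≤ p.2.length ∧
      (p.2.getD 0 "" = "Match" →
        (some (p.2.getD 2 "")) ∈ ext.headD [] ∧
        ∀ row ∈ ext.drop 1,
          (PySem.List.index? (ext.headD []) (some (p.2.getD 2 ""))).getD 0 < row.length) ∧
      (p.2.getD 0 "" = "Lookup" → p.2.getD 1 "" = "qty" →
        (some "Quantity") ∈ ext.headD [] ∧ (some "Quantity Needed") ∈ ext.headD [] ∧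
        ∀ row ∈ ext.drop 1,
          (PySem.List.index? (ext.headD []) (some "Quantity")).getD 0 < row.length ∧
          (PySem.List.index? (ext.headD []) (some "Quantity Needed")).getD 0 < row.length))
instance (ext : List (List (Option String))) (mapdic : List (String × List String)) : Decidable (Pre_transform ext mapdic) := by unfold Pre_transform; infer_instance

def pvWitness_transform : List (List (Option String)) × (List (String × List String)) :=
  ([[some "Quantity", some "Quantity Needed", some "A"], [some "5", none, some "x"]],
   [("Item", ["Static", "", "Widget"]), ("Name", ["Match", "", "A"]), ("Qty", ["Lookup", "qty", ""])])

def Spec_transform (ext : List (List (Option String))) (mapdic : List (String × List String)) (out : List (List (Option String))) : Prop := out = transform_alt ext mapdic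
instance (ext : List (List (Option String))) (mapdic : List (String × List String)) (out : List (List (Option String))) : Decidable (Spec_transform ext mapdic out) := by unfold Spec_transform; infer_instance

-- ===== CLAIM (what is proved, stated in full; the proofs are below) =====
def Claim_equal_transform : Prop := ∀ (ext : List (List (Option String))) (mapdic : List (String × List String)), Dom_transform ext mapdic → Pre_transform ext mapdic → Spec_transform ext mapdic (transform ext mapdic)

-- ===== LEMMAS AND PROOFS =====

-- setting position as.length in as ++ b :: bs replaces b
theorem pv_set_mid {α : Type} (as : List α) (b : α) (bs : List α) (v : α) :
    (as ++ b :: bs).set as.length v = as ++ v :: bs := by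
  rw [List.set_append]; simp

-- the invariant of A's inner column loop: after the columns in pre are processed, nrow carries
-- exactly B's resolver values on pre and none elsewhere; folding the rest completes the row
theorem pv_fill (head : List (Option String)) (d : PySem.Dict String (List String))
    (row : List (Option String)) (nh : List String) (hnd : nh.Nodup) :
    ∀ (suf pre : List String), nh = pre ++ suf →
    suf.foldl (fun nrow field =>
        let i := (PySem.List.index? nh field).getD 0
        let entry := (d.get? field).getD []
        let ty := (PySem.List.pyGet? entry 0).getD ""
        let loc := (PySem.List.pyGet? entry 1).getD ""
        let sf := (PySem.List.pyGet? entry 2).getD ""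
        if ty = "Static" then nrow.set i (some sf)
        else if ty = "Match" then
          let sfi := (PySem.List.index? head (some sf)).getD 0
          nrow.set i ((PySem.List.pyGet? row (sfi : Int)).getD none)
        else if ty = "Lookup" then
          if loc = "qty" then
            let qty := (PySem.List.pyGet? row (((PySem.List.index? head (some "Quantity")).getD 0 : Nat) : Int)).getD none
            let qtyn := (PySem.List.pyGet? row (((PySem.List.index? head (some "Quantity Needed")).getD 0 : Nat) : Int)).getD none
            if qtyn ≠ none then nrow.set i qtyn else nrow.set i qty
          else nrow
        else nrow)
      (pre.map (fun f => pvApply (pvResolve head d f) row) ++ List.replicate suf.length (none : Option String))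
    = nh.map (fun f => pvApply (pvResolve head d f) row) := by
  intro suf
  induction suf with
  | nil => intro pre h; subst h; simp
  | cons f suf ih =>
    intro pre h
    have hfp : f ∉ pre := by
      have h2 := hnd; rw [h] at h2
      intro hm
      exact List.rel_of_pairwise_cons (List.nodup_middle.mp h2) (List.mem_append_left _ hm) rfl
    have hidx : PySem.List.index? nh f = some pre.length := by
      rw [PySem.List.index?_eq_some_iff]; exact ⟨pre, suf, h, rfl, hfp⟩
    rw [List.foldl_cons]
    have hacc : (pre.map (fun f => pvApply (pvResolve head d f) row) ++
        List.replicate (f :: suf).length (none : Option String))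
        = (pre.map (fun f => pvApply (pvResolve head d f) row)) ++
          (none : Option String) :: List.replicate suf.length none := by
      simp [List.replicate_succ]
    rw [hacc]
    have hlen : (pre.map (fun f => pvApply (pvResolve head d f) row)).length = pre.length := by simp
    have hset : ∀ v : Option String,
        ((pre.map (fun f => pvApply (pvResolve head d f) row)) ++
          (none : Option String) :: List.replicate suf.length none).set pre.length v
        = (pre.map (fun f => pvApply (pvResolve head d f) row)) ++ v :: List.replicate suf.length none := by
      intro v
      have := pv_set_mid (pre.map (fun f => pvApply (pvResolve head d f) row))
        (none : Option String) (List.replicate suf.length none) v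
      rwa [hlen] at this
    have hbody :
        (fun nrow field =>
          let i := (PySem.List.index? nh field).getD 0
          let entry := (d.get? field).getD []
          let ty := (PySem.List.pyGet? entry 0).getD ""
          let loc := (PySem.List.pyGet? entry 1).getD ""
          let sf := (PySem.List.pyGet? entry 2).getD ""
          if ty = "Static" then nrow.set i (some sf)
          else if ty = "Match" then
            let sfi := (PySem.List.index? head (some sf)).getD 0
            nrow.set i ((PySem.List.pyGet? row (sfi : Int)).getD none)
          else if ty = "Lookup" then
            if loc = "qty" then
              let qty := (PySem.List.pyGet? row (((PySem.List.index? head (some "Quantity")).getD 0 : Nat) : Int)).getD none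
              let qtyn := (PySem.List.pyGet? row (((PySem.List.index? head (some "Quantity Needed")).getD 0 : Nat) : Int)).getD none
              if qtyn ≠ none then nrow.set i qtyn else nrow.set i qty
            else nrow
          else nrow)
          ((pre.map (fun f => pvApply (pvResolve head d f) row)) ++
            (none : Option String) :: List.replicate suf.length none) f
        = ((pre ++ [f]).map (fun f => pvApply (pvResolve head d f) row)) ++
            List.replicate suf.length (none : Option String) := by
      simp only [hidx, Option.getD_some]
      split_ifs with h1 h2 h3 h4 h5
      · rw [hset]; simp [pvResolve, pvApply, h1]
      · rw [hset]; simp [pvResolve, pvApply, h2]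
      · rw [hset]; simp [pvResolve, pvApply, h3, h4]
        intro hc; simp [pysem] at h5; exact absurd hc h5
      · rw [hset]; simp [pvResolve, pvApply, h3, h4]
        intro hc; simp [pysem] at h5; exact absurd h5 hc
      · simp [pvResolve, pvApply, h3, h4]
      · simp [pvResolve, pvApply, h1, h2, h3]
    exact (congrArg (fun z => List.foldl _ z suf) hbody).trans
      (ih (pre ++ [f]) (by rw [h, List.append_assoc]; rfl))

theorem transform_spec : Claim_equal_transform := by
  intro ext mapdic _ _
  unfold Spec_transform transform transform_alt
  rw [PySem.List.foldl_append_singleton_eq_map]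
  by_cases hb : (PySem.List.slice ext (some 1) none).isEmpty
  · rw [List.isEmpty_iff] at hb
    simp [hb]
  · rw [if_neg (by simp [hb])]
    rw [List.singleton_append]
    congr 1
    apply List.map_congr_left
    intro row _
    rw [List.map_map]
    exact pv_fill ((PySem.List.pyGet? ext 0).getD []) (PySem.Dict.ofList mapdic) row
      (PySem.Dict.ofList mapdic).keys (PySem.Dict.nodup_keys_ofList mapdic) _ [] rfl
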